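-- pv_equiv track=rewrite | github.com/ki-ARA-sh/Algorithms_Tutorial | 006_divisibility_by_11/code04.py | change_base
-- ===== SOURCE A (Python) =====
-- def change_base(x):
--     c = [0, 1, 2, 4, 6, 8, 9]
--     y = 0
--     current_power_of_ten = 1
--     while x > 0:
--         y = y + current_power_of_ten * c[x % 7]
--         x = x // 7
--         current_power_of_ten = current_power_of_ten * 10
--     return y
-- ===== SOURCE B (Python) =====
-- def change_base(x):
--     def go(n):
--         if n == 0:
--             return 0
--         return 10 * go(n // 7) + (0, 1, 2, 4, 6, 8, 9)[n % 7]
--     return go(x) if x > 0 else 0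
-- ===== Notes on version B (the rewrite author's own statement) =====
-- stated objective: simpler
-- what changed: B replaces A's iterative least-significant-first loop carrying two accumulators (running sum and power-of-ten) with a direct most-significant-first recursion go(n) = ten*go(n div 7) + table[n mod 7], no accumulator state at all.
import Mathlib
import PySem

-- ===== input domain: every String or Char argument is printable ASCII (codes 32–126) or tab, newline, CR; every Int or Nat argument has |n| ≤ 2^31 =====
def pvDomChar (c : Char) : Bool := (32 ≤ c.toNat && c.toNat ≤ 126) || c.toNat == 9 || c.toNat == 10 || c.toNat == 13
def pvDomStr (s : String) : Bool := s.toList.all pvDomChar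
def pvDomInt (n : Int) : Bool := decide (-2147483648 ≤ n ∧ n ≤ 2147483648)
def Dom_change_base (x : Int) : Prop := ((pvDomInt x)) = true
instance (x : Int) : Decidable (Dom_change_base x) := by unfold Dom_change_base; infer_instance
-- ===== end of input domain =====

-- B replaces A's iterative least-significant-first loop with its two accumulators
-- (running sum, power of ten) by a direct most-significant-first recursion with no
-- accumulator: simpler control state, same result.

-- ===== PORT A =====
-- the index mod x 7 is always in [0,7), so the default 0 of pyGetD is never taken
def changeBaseLoopA (x y p : Int) : Int :=
  if 0 < x then
    changeBaseLoopA (PySem.Int.floordiv x 7)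
      (y + p * PySem.List.pyGetD [0, 1, 2, 4, 6, 8, 9] (PySem.Int.mod x 7) 0)
      (p * 10)
  else y
termination_by x.toNat
decreasing_by
  rw [PySem.Int.floordiv_eq_ediv_of_pos (by omega : (0:Int) < 7)]
  omega

def change_base (x : Int) : Int := changeBaseLoopA x 0 1

-- ===== PORT B =====
-- go is only ever applied to nonnegative values (x > 0 is checked first), so its
-- argument is carried as a Nat and Python's // and % on it are exactly Nat / and %.
def changeBaseGoB (n : Nat) : Int :=
  if n = 0 then 0
  else 10 * changeBaseGoB (n / 7) + List.getD [0, 1, 2, 4, 6, 8, 9] (n % 7) 0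
decreasing_by exact Nat.div_lt_self (by omega) (by omega)

def change_base_alt (x : Int) : Int :=
  if 0 < x then changeBaseGoB x.toNat else 0

-- ===== PRECONDITION & SPEC =====
def Spec_change_base (x : Int) (out : Int) : Prop := out = change_base_alt x
instance (x : Int) (out : Int) : Decidable (Spec_change_base x out) := by unfold Spec_change_base; infer_instance

-- ===== CLAIM (what is proved, stated in full; the proofs are below) =====
def Claim_equal_change_base : Prop := ∀ (x : Int), Dom_change_base x → Spec_change_base x (change_base x)

-- ===== LEMMAS AND PROOFS =====
lemma pvLoopA (n : Nat) : ∀ x y p : Int, x.toNat ≤ n →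
    changeBaseLoopA x y p = y + p * changeBaseGoB x.toNat := by
  induction n with
  | zero =>
    intro x y p hx
    have hx0 : ¬ 0 < x := by omega
    have hm : x.toNat = 0 := by omega
    rw [changeBaseLoopA, if_neg hx0, hm, changeBaseGoB]
    simp
  | succ n ih =>
    intro x y p hx
    by_cases h : 0 < x
    · rw [changeBaseLoopA, if_pos h]
      have hxm : x = ((x.toNat : Nat) : Int) := by omega
      have hdiv : PySem.Int.floordiv x 7 = ((x.toNat / 7 : Nat) : Int) := by
        rw [hxm]; exact_mod_cast PySem.Int.floordiv_natCast x.toNat 7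
      have hmod : PySem.Int.mod x 7 = ((x.toNat % 7 : Nat) : Int) := by
        rw [hxm]; exact_mod_cast PySem.Int.mod_natCast x.toNat 7
      have hlt : (PySem.Int.floordiv x 7).toNat ≤ n := by
        rw [hdiv]; simp; omega
      rw [ih _ _ _ hlt, hdiv, hmod]
      have hm0 : x.toNat ≠ 0 := by omega
      rw [show changeBaseGoB x.toNat
            = 10 * changeBaseGoB (x.toNat / 7) + List.getD [0, 1, 2, 4, 6, 8, 9] (x.toNat % 7) 0
          from by rw [changeBaseGoB, if_neg hm0]]
      simp only [Int.toNat_natCast, PySem.List.pyGetD_natCast]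
      ring
    · have hm : x.toNat = 0 := by omega
      rw [changeBaseLoopA, if_neg h, hm, changeBaseGoB]
      simp

-- ===== VERDICT (by name: the statement is the Claim_ definition above) =====
theorem change_base_spec : Claim_equal_change_base := by
  intro x _
  unfold Spec_change_base change_base change_base_alt
  rw [pvLoopA x.toNat x 0 1 le_rfl]
  by_cases h : 0 < x
  · rw [if_pos h]; ring
  · have hm : x.toNat = 0 := by omega
    rw [if_neg h, hm, changeBaseGoB]
    simp
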